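-- pv_equiv track=rewrite | github.com/Ravi-0412/DSA-Program-And-Notes | Queue/FInd Winner in KnockOut Tournament.py | generate_valid_draw
-- ===== SOURCE A (Python) =====
-- def generate_valid_draw(n):
--     # Base case: The champion starts alone
--     draw = [1]
--     # We expand the tournament level by level (2, 4, 8... N)
--     current_n = 1
--     while current_n < n:
--         # Every level doubles the number of players
--         current_n *= 2
--         new_draw = []
--         # For every player already in the draw,
--         # pair them with the 'worst' player available in this new size
--         for rank in draw:
--             new_draw.append(rank)
--             # The 'Worst' player for rank 'r' is (Total + 1 - r)
--             new_draw.append(current_n + 1 - rank)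
--         draw = new_draw
--
--     return draw
-- ===== SOURCE B (Python) =====
-- def generate_valid_draw(n):
--     # number of rounds: smallest k with 2**k >= n (0 when n <= 1)
--     k = 0 if n <= 1 else (n - 1).bit_length()
--
--     def expand(j):
--         # top-down: draw for a bracket of 2**j players
--         if j == 0:
--             return [1]
--         size = 1 << j
--         return [x for r in expand(j - 1) for x in (r, size + 1 - r)]
--
--     return expand(k)
-- ===== Notes on version B (the rewrite author's own statement) =====
-- stated objective: alternative
-- what changed: Replaces A's bottom-up while-loop that doubles a running size and rebuilds the draw each round with a closed-form round count (bit_length) plus a top-down recursive expand(j) that builds the bracket by divide-and-conquer.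
import Mathlib
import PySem

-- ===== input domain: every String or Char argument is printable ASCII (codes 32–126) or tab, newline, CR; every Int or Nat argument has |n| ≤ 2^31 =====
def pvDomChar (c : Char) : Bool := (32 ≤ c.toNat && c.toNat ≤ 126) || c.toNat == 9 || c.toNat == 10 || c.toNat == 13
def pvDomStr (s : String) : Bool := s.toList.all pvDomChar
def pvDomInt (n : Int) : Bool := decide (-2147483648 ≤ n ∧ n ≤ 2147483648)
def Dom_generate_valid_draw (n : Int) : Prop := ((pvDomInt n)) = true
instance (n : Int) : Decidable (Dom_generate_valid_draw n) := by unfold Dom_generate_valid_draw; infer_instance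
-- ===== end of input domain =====

-- B changes the decomposition (top-down recursive bracket expansion with a closed-form
-- round count) instead of A's bottom-up doubling loop; same output, same cost.

-- ===== PORT A =====
-- A's while loop; the invariant 1 ≤ cur (true from the call site, cur starts at 1 and
-- only doubles) is carried as a proof argument solely for termination.
def pvLoopA (n cur : Int) (draw : List Int) (h : 1 ≤ cur) : List Int :=
  if _hlt : cur < n then
    pvLoopA n (cur * 2) (draw.flatMap fun rank => [rank, cur * 2 + 1 - rank]) (by omega)
  else draw
termination_by (n - cur).toNat
decreasing_by omega

def generate_valid_draw (n : Int) : List Int :=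
  pvLoopA n 1 [1] (by norm_num)

-- ===== PORT B =====
-- expand(j): the draw for a bracket of 2^j players (Source B's recursive helper, on the exponent)
def pvExpandB : Nat → List Int
  | 0 => [1]
  | j + 1 => (pvExpandB j).flatMap fun r => [r, (2 : Int) ^ (j + 1) + 1 - r]

-- (n-1).bit_length() for n ≥ 2 is Nat.log 2 (n-1) + 1
def generate_valid_draw_alt (n : Int) : List Int :=
  let k : Nat := if n ≤ 1 then 0 else Nat.log 2 (n - 1).toNat + 1
  pvExpandB k

-- ===== PRECONDITION & SPEC =====
def Spec_generate_valid_draw (n : Int) (out : List Int) : Prop := out = generate_valid_draw_alt n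
instance (n : Int) (out : List Int) : Decidable (Spec_generate_valid_draw n out) := by unfold Spec_generate_valid_draw; infer_instance

-- ===== CLAIM (what is proved, stated in full; the proofs are below) =====
def Claim_equal_generate_valid_draw : Prop := ∀ (n : Int), Dom_generate_valid_draw n → Spec_generate_valid_draw n (generate_valid_draw n)

-- ===== LEMMAS AND PROOFS =====

-- the exit index of A's loop equals B's closed-form round count
lemma pv_exit_index (n : Int) (j : Nat) (hinv : j = 0 ∨ (2 : Int) ^ (j - 1) < n)
    (hge : ¬ (2 : Int) ^ j < n) :
    (if n ≤ 1 then 0 else Nat.log 2 (n - 1).toNat + 1) = j := by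
  cases j with
  | zero =>
      simp only [pow_zero] at hge
      have : n ≤ 1 := by omega
      simp [this]
  | succ j' =>
      rcases hinv with h0 | hlt
      · exact absurd h0 (by omega)
      · simp only [Nat.add_sub_cancel] at hlt
        have h2 : (1 : Int) ≤ 2 ^ j' := one_le_pow₀ (by norm_num)
        have hn2 : ¬ n ≤ 1 := by omega
        simp only [hn2, if_false]
        congr 1
        -- 2^j' ≤ (n-1).toNat < 2^(j'+1)
        set a : Nat := 2 ^ j' with ha
        have hcast : ((a : Int)) = 2 ^ j' := by push_cast [ha]; ring
        have hub : n - 1 < (2 : Int) ^ (j' + 1) := by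
          have := not_lt.mp hge; omega
        have hub' : ((2 : Int) ^ (j' + 1)) = ((2 * a : Nat) : Int) := by
          push_cast [ha]; ring
        have hle : a ≤ (n - 1).toNat := by omega
        have hlt2 : (n - 1).toNat < 2 * a := by omega
        have : Nat.log 2 (n - 1).toNat = j' := by
          apply Nat.log_eq_of_pow_le_of_lt_pow
          · exact hle
          · calc (n - 1).toNat < 2 * a := hlt2
              _ = 2 ^ (j' + 1) := by rw [ha]; ring
        exact this

lemma pv_loop_eq (n : Int) (m : Nat) : ∀ (j : Nat) (cur : Int) (h : 1 ≤ cur) (d : List Int),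
    cur = 2 ^ j → d = pvExpandB j →
    (n - cur).toNat ≤ m → (j = 0 ∨ (2 : Int) ^ (j - 1) < n) →
    pvLoopA n cur d h =
      pvExpandB (if n ≤ 1 then 0 else Nat.log 2 (n - 1).toNat + 1) := by
  induction m with
  | zero =>
      intro j cur h d hcur hd hm hinv
      subst hcur; subst hd
      have hge : ¬ (2 : Int) ^ j < n := by omega
      rw [pvLoopA, dif_neg hge, pv_exit_index n j hinv hge]
  | succ m ih =>
      intro j cur h d hcur hd hm hinv
      by_cases hlt : cur < n
      · rw [pvLoopA, dif_pos hlt]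
        refine ih (j + 1) (cur * 2) (by omega) _ ?_ ?_ ?_ ?_
        · subst hcur; ring
        · subst hcur; subst hd; simp [pvExpandB, pow_succ]
        · omega
        · exact Or.inr (by simpa [hcur] using hlt)
      · subst hcur; subst hd
        rw [pvLoopA, dif_neg hlt, pv_exit_index n j hinv hlt]

-- ===== VERDICT (by name: the statement is the Claim_ definition above) =====
theorem generate_valid_draw_spec : Claim_equal_generate_valid_draw := by
  intro n _
  unfold Spec_generate_valid_draw generate_valid_draw generate_valid_draw_alt
  have h1 : (1 : Int) = 2 ^ (0 : Nat) := by norm_num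
  have := pv_loop_eq n (n - 1).toNat 0 1 (by norm_num) [1] (by norm_num) (by simp [pvExpandB]) (by omega) (Or.inl rfl)
  simpa using this
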